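-- pv_equiv track=rewrite | github.com/magizbox/underthesea.UTSWS_1 | maintaince/compare_2_doc.py | find_diferent
-- ===== SOURCE A (Python) =====
-- def find_diferent(words, sentence):
--     count = 0
--     result = []
--     similar = []
--     for i in range(0, len(words)):
--         if (words[i] == sentence[count:(count + 1 + len(words[i]))]) or (
--                     words[i] == sentence[count:(count + len(words[i]))]):
--             similar.append(words[i])
--         else:
--             result.append(words[i])
--         count += (len(words[i]) + 1)
--     return similar
-- ===== SOURCE B (Python) =====
-- def find_diferent(words, sentence):
--     # Consume the sentence itself: keep each word if the remaining suffix of the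
--     # sentence starts with it, then cut off that word plus one separator char.
--     rest = sentence
--     similar = []
--     for w in words:
--         if rest.startswith(w):
--             similar.append(w)
--         rest = rest[len(w) + 1:]
--     return similar
-- ===== Notes on version B (the rewrite author's own statement) =====
-- stated objective: alternative
-- what changed: B consumes the sentence itself (repeatedly cutting off the matched word plus one separator and testing the remaining suffix with startswith) instead of indexing the full sentence with a running count and the two-slice OR test; the proof shows the two-slice OR collapses to a single startswith on the suffix.
import Mathlib
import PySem

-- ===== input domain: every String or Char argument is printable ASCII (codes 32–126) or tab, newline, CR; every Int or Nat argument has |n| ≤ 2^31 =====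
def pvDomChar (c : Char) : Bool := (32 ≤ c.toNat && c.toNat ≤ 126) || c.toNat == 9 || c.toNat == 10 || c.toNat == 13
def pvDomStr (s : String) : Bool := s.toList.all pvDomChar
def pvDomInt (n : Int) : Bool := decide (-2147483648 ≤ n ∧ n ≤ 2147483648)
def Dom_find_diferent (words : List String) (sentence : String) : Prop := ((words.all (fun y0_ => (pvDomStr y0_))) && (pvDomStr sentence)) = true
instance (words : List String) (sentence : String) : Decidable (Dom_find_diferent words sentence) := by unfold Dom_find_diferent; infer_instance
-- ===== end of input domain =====

-- B consumes the sentence suffix with startswith instead of indexing with a running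
-- count and the two-slice OR test. Objective: alternative decomposition.

-- ===== PORT A =====
-- the two-slice 'or' condition of A, verbatim
def find_diferent_cond (s : List Char) (w : String) (c : Int) : Bool :=
  decide (w.toList = PySem.Chars.slice s (some c) (some (c + 1 + (w.toList.length : Int))))
    || decide (w.toList = PySem.Chars.slice s (some c) (some (c + (w.toList.length : Int))))

-- one loop step of A: state is (count, result, similar), exactly A's three variables
def find_diferent_step (s : List Char) (st : Int × List String × List String) (w : String) :
    Int × List String × List String :=
  if find_diferent_cond s w st.1 then
    (st.1 + ((w.toList.length : Int) + 1), st.2.1, st.2.2 ++ [w])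
  else
    (st.1 + ((w.toList.length : Int) + 1), st.2.1 ++ [w], st.2.2)

def find_diferent (words : List String) (sentence : String) : List String :=
  let s := sentence.toList
  let st := words.foldl (find_diferent_step s) (0, [], [])
  st.2.2

-- ===== PORT B =====
-- one loop step of B: state is (rest, similar); test 'rest.startswith(w)',
-- then cut 'rest = rest[len(w)+1:]'
def find_diferent_alt_step (st : List Char × List String) (w : String) :
    List Char × List String :=
  let sim := if PySem.Chars.startswith st.1 w.toList then st.2 ++ [w] else st.2
  (PySem.Chars.slice st.1 (some ((w.toList.length : Int) + 1)) none, sim)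

def find_diferent_alt (words : List String) (sentence : String) : List String :=
  (words.foldl find_diferent_alt_step (sentence.toList, [])).2

-- ===== PRECONDITION & SPEC =====
def Spec_find_diferent (words : List String) (sentence : String) (out : List String) : Prop := out = find_diferent_alt words sentence
instance (words : List String) (sentence : String) (out : List String) : Decidable (Spec_find_diferent words sentence out) := by unfold Spec_find_diferent; infer_instance

-- ===== CLAIM (what is proved, stated in full; the proofs are below) =====
def Claim_equal_find_diferent : Prop := ∀ (words : List String) (sentence : String), Dom_find_diferent words sentence → Spec_find_diferent words sentence (find_diferent words sentence)

-- ===== LEMMAS AND PROOFS =====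

-- A's two-slice OR test at offset n equals B's startswith on the suffix s.drop n:
-- equality against the (len+1)-slice forces the suffix to have exactly len chars,
-- so it implies equality against the len-slice.
lemma cond_eq_startswith (s : List Char) (w : String) (n : Nat) :
    find_diferent_cond s w (n : Int) = PySem.Chars.startswith (s.drop n) w.toList := by
  have h1 : ((n : Int) + 1 + (w.toList.length : Int))
      = ((n : Int) + ((w.toList.length + 1 : Nat) : Int)) := by push_cast; ring
  unfold find_diferent_cond
  rw [h1]
  simp only [PySem.Chars.slice_eq_listSlice, PySem.List.slice_natCast_add]
  set t := s.drop n with ht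
  by_cases h : w.toList <+: t
  · have htake : t.take w.toList.length = w.toList := (List.prefix_iff_eq_take.mp h).symm
    rw [(PySem.Chars.startswith_iff t w.toList).mpr h]
    have hd : decide (w.toList = t.take w.toList.length) = true :=
      decide_eq_true htake.symm
    rw [hd, Bool.or_true]
  · have hsw : PySem.Chars.startswith t w.toList = false := by
      cases hb : PySem.Chars.startswith t w.toList
      · rfl
      · exact absurd ((PySem.Chars.startswith_iff t w.toList).mp hb) h
    have hne : ¬ w.toList = t.take w.toList.length := by
      intro he
      exact h (he ▸ List.take_prefix _ _)
    have hne1 : ¬ w.toList = t.take (w.toList.length + 1) := by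
      intro he
      apply hne
      have hlen := congrArg List.length he
      rw [List.length_take] at hlen
      have htl : t.length ≤ w.toList.length := by omega
      rw [List.take_of_length_le htl]
      rw [List.take_of_length_le (le_trans htl (Nat.le_succ _))] at he
      exact he
    rw [hsw]
    simp only [Bool.or_eq_false_iff, decide_eq_false_iff_not]
    exact ⟨hne1, hne⟩

-- rest[k+1:] on a list is List.drop (k+1)
lemma slice_from_succ (t : List Char) (k : Nat) :
    PySem.Chars.slice t (some ((k : Int) + 1)) none = t.drop (k + 1) := by
  have : ((k : Int) + 1) = ((k + 1 : Nat) : Int) := by push_cast; ring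
  rw [this, PySem.Chars.slice_eq_listSlice, PySem.List.slice_from_natCast]

-- loop invariant: A's foldl started at count n with accumulators (res, sim) returns,
-- as its 'similar' component, B's foldl over the suffix s.drop n started at sim
lemma loop_eq (s : List Char) :
    ∀ (ws : List String) (n : Nat) (res sim : List String),
      (ws.foldl (find_diferent_step s) ((n : Int), res, sim)).2.2 =
        (ws.foldl find_diferent_alt_step (s.drop n, sim)).2 := by
  intro ws
  induction ws with
  | nil => intro n res sim; simp
  | cons w ws ih =>
    intro n res sim
    rw [List.foldl_cons, List.foldl_cons]
    have hdrop : PySem.Chars.slice (s.drop n) (some ((w.toList.length : Int) + 1)) none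
        = s.drop (n + (w.toList.length + 1)) := by
      rw [slice_from_succ, List.drop_drop]
    have hcount : (n : Int) + ((w.toList.length : Int) + 1)
        = ((n + (w.toList.length + 1) : Nat) : Int) := by push_cast; ring
    cases hc : find_diferent_cond s w (n : Int) with
    | true =>
      have hsw : PySem.Chars.startswith (s.drop n) w.toList = true := by
        rw [← cond_eq_startswith, hc]
      have hA : find_diferent_step s ((n : Int), res, sim) w
          = (((n + (w.toList.length + 1) : Nat) : Int), res, sim ++ [w]) := by
        unfold find_diferent_step
        rw [if_pos hc, hcount]
      have hB : find_diferent_alt_step (s.drop n, sim) w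
          = (s.drop (n + (w.toList.length + 1)), sim ++ [w]) := by
        unfold find_diferent_alt_step
        rw [if_pos hsw, hdrop]
      rw [hA, hB]
      exact ih _ _ _
    | false =>
      have hsw : PySem.Chars.startswith (s.drop n) w.toList = false := by
        rw [← cond_eq_startswith, hc]
      have hA : find_diferent_step s ((n : Int), res, sim) w
          = (((n + (w.toList.length + 1) : Nat) : Int), res ++ [w], sim) := by
        unfold find_diferent_step
        rw [if_neg (by rw [hc]; exact Bool.false_ne_true), hcount]
      have hB : find_diferent_alt_step (s.drop n, sim) w
          = (s.drop (n + (w.toList.length + 1)), sim) := by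
        unfold find_diferent_alt_step
        rw [if_neg (by rw [hsw]; exact Bool.false_ne_true), hdrop]
      rw [hA, hB]
      exact ih _ _ _

-- ===== VERDICT (by name: the statement is the Claim_ definition above) =====
theorem find_diferent_spec : Claim_equal_find_diferent := by
  intro words sentence _
  unfold Spec_find_diferent find_diferent find_diferent_alt
  have := loop_eq sentence.toList words 0 [] []
  simpa using this
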